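-- pv_equiv track=rewrite | github.com/brownology/codeparser | parsefile.py | unreferencedMethods
-- ===== SOURCE A (Python) =====
-- def unreferencedMethods(jsRefMethods, actionMethods):
--     refmethods = []
--     unrefmethods = []
--     for jmethod in jsRefMethods:
--         #Remove the referenced methods
--         if jmethod in actionMethods:
--             actionMethods.remove(jmethod)
--     #return the unreferenced methods
--     #the referenced methods have been removed
--     actionMethods.sort()
--     return actionMethods
-- ===== SOURCE B (Python) =====
-- def unreferencedMethods(jsRefMethods, actionMethods):
--     budget = {}
--     for m in jsRefMethods:
--         budget[m] = budget.get(m, 0) + 1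
--     kept = []
--     for m in actionMethods:
--         if budget.get(m, 0) > 0:
--             budget[m] = budget[m] - 1
--         else:
--             kept.append(m)
--     actionMethods[:] = sorted(kept)
--     return actionMethods
-- ===== Notes on version B (the rewrite author's own statement) =====
-- stated objective: faster
-- what changed: Replaces A's per-reference membership test plus list.remove rescans with a frequency dict of jsRefMethods used as removal budgets and a single pass over actionMethods collecting unremoved elements, then one sort written back in place.
import Mathlib
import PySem

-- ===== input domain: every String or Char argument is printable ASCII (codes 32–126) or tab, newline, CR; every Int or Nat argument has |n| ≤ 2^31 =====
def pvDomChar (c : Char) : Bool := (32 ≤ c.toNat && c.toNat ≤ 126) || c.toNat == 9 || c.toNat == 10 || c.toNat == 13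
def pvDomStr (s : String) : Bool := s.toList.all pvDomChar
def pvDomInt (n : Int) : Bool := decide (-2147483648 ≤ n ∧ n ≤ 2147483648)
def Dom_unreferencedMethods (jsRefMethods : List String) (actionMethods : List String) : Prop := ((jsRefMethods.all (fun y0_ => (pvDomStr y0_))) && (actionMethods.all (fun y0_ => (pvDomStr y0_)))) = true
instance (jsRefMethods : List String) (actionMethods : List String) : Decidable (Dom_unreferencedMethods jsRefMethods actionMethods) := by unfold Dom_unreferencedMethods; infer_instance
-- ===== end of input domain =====

-- B replaces A's repeated membership-test + list.remove rescans with a frequency-dict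
-- removal budget and one pass over actionMethods (faster); both mutate actionMethods in
-- place and the equivalence proved here is about the return value.


-- ===== PORT A =====
def unreferencedMethods (jsRefMethods : List String) (actionMethods : List String) : List String :=
  let final := jsRefMethods.foldl (fun am jmethod =>
    if jmethod ∈ am then
      match PySem.List.remove? am jmethod with
      | some r => r
      | none => am
    else am) actionMethods
  PySem.List.sorted final (fun x => x) false

-- ===== PORT B =====
def unreferencedMethods_alt (jsRefMethods : List String) (actionMethods : List String) : List String :=
  let budget := jsRefMethods.foldl (fun d m => d.insert m (d.getD m 0 + 1)) PySem.Dict.empty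
  let st := actionMethods.foldl (fun (st : PySem.Dict String Int × List String) m =>
    if st.1.getD m 0 > 0 then (st.1.insert m (st.1.getD m 0 - 1), st.2)
    else (st.1, st.2 ++ [m])) (budget, [])
  PySem.List.sorted st.2 (fun x => x) false

-- ===== PRECONDITION & SPEC =====
def Spec_unreferencedMethods (jsRefMethods : List String) (actionMethods : List String) (out : List String) : Prop := out = unreferencedMethods_alt jsRefMethods actionMethods
instance (jsRefMethods : List String) (actionMethods : List String) (out : List String) : Decidable (Spec_unreferencedMethods jsRefMethods actionMethods out) := by unfold Spec_unreferencedMethods; infer_instance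

-- ===== CLAIM (what is proved, stated in full; the proofs are below) =====
def Claim_equal_unreferencedMethods : Prop := ∀ (jsRefMethods : List String) (actionMethods : List String), Dom_unreferencedMethods jsRefMethods actionMethods → Spec_unreferencedMethods jsRefMethods actionMethods (unreferencedMethods jsRefMethods actionMethods)

-- ===== LEMMAS AND PROOFS =====

-- A's removal loop: for each occurrence of v in jsRefMethods, one occurrence of v is
-- removed from actionMethods if any is left; so the final count is a truncated difference.
theorem countA (jsRefMethods : List String) (actionMethods : List String) (v : String) :
    (jsRefMethods.foldl (fun am jmethod =>
      if jmethod ∈ am then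
        match PySem.List.remove? am jmethod with
        | some r => r
        | none => am
      else am) actionMethods).count v
    = actionMethods.count v - jsRefMethods.count v := by
  induction jsRefMethods generalizing actionMethods with
  | nil => simp
  | cons j rest ih =>
    simp only [List.foldl_cons]
    by_cases hj : j ∈ actionMethods
    · rw [if_pos hj, PySem.List.remove?_eq_some_erase _ _ hj]
      simp only [ih]
      rw [List.count_erase]
      by_cases hv : j = v
      · subst hv
        have : 1 ≤ actionMethods.count j := List.one_le_count_iff.mpr hj
        simp
        omega
      · simp [List.count_cons, if_neg hv]
    · rw [if_neg hj]
      rw [ih]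
      have h0 : actionMethods.count j = 0 := List.count_eq_zero.mpr hj
      by_cases hv : j = v
      · subst hv; simp [h0]
      · simp [List.count_cons, if_neg hv]

-- B's single pass: each occurrence is dropped while its budget is positive, kept after;
-- the kept count is the processed count minus the (nonnegative) starting budget.
theorem countB (actionMethods : List String) (b : PySem.Dict String Int) (kept : List String)
    (v : String) (hb : 0 ≤ b.getD v 0) :
    (actionMethods.foldl (fun (st : PySem.Dict String Int × List String) m =>
      if st.1.getD m 0 > 0 then (st.1.insert m (st.1.getD m 0 - 1), st.2)
      else (st.1, st.2 ++ [m])) (b, kept)).2.count v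
    = kept.count v + (actionMethods.count v - (b.getD v 0).toNat) := by
  induction actionMethods generalizing b kept with
  | nil => simp
  | cons m rest ih =>
    simp only [List.foldl_cons]
    by_cases hpos : b.getD m 0 > 0
    · rw [if_pos hpos]
      by_cases hv : v = m
      · subst hv
        have hset : (b.insert v (b.getD v 0 - 1)).getD v 0 = b.getD v 0 - 1 := by
          rw [PySem.Dict.getD_insert]; simp
        rw [ih _ _ (by rw [hset]; omega)]
        rw [hset]
        simp only [List.count_cons_self]
        omega
      · have hset : (b.insert m (b.getD m 0 - 1)).getD v 0 = b.getD v 0 := by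
          rw [PySem.Dict.getD_insert]; simp [hv]
        rw [ih _ _ (by rw [hset]; exact hb)]
        rw [hset]
        simp [List.count_cons, if_neg (Ne.symm hv)]
    · rw [if_neg hpos]
      by_cases hv : v = m
      · subst hv
        have h0 : (b.getD v 0).toNat = 0 := by omega
        rw [ih _ _ hb]
        simp [List.count_cons_self, h0]
        omega
      · rw [ih _ _ hb]
        simp [List.count_append, List.count_cons, if_neg (Ne.symm hv)]

-- ===== VERDICT (by name: the statement is the Claim_ definition above) =====
theorem unreferencedMethods_spec : Claim_equal_unreferencedMethods := by
  intro jsRefMethods actionMethods _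
  unfold Spec_unreferencedMethods unreferencedMethods unreferencedMethods_alt
  apply PySem.List.sorted_eq_sorted_of_perm _ _ _ (fun a b h => h)
  rw [List.perm_iff_count]
  intro v
  rw [countA, countB]
  · rw [PySem.Dict.getD_foldl_insert_add_one, PySem.Dict.getD_empty]
    simp
  · rw [PySem.Dict.getD_foldl_insert_add_one, PySem.Dict.getD_empty]
    positivity
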